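-- pv_equiv track=rewrite | github.com/AichaNT/nlp25_project_gr2 | data_aug_code/data_augmentation.py | entities_by_label
-- ===== SOURCE A (Python) =====
-- def entities_by_label(data, target_label):
--     """
--     Collects full entity name of locations and organisation from labeled the dataset.
--     If an entity is made up of multiple words, it joins them into a single string.
--
--     Args:
--         data (List[Dict]): Dataset containing 'tokens' and 'tags' for each sentence.
--         target_label (str): Label prefix to filter for (e.g., 'B-LOC', 'B-ORG').
--
--     Returns:
--         Set[str]: A set of labeled token strings (e.g., {'Beirut', 'Al Mawsil al Jadidah'})
--     """
--     grouped_strings = set()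
--
--     for sent in data:
--         tokens = sent['tokens']
--         tags = sent['ner_tags']
--
--         i = 0
--         while i < len(tokens):
--             tag = tags[i]
--
--             if tag.startswith(target_label):
--                 span_tokens = [tokens[i]]
--                 i += 1
--                 while i < len(tokens) and tags[i].startswith('I'):
--                     span_tokens.append(tokens[i])
--                     i += 1
--
--                 # Join tokens into a single string and add to the set
--                 entity_string = ' '.join(span_tokens)
--                 grouped_strings.add(entity_string)
--             else:
--                 i += 1
--
--     return grouped_strings
-- ===== SOURCE B (Python) =====
-- def entities_by_label(data, target_label):
--     grouped_strings = set()
--     for sent in data: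
--         tokens = sent['tokens']
--         tags = sent['ner_tags']
--         span = None
--         for tok, tag in zip(tokens, tags):
--             if span is not None and tag.startswith('I'):
--                 span.append(tok)
--                 continue
--             if span is not None:
--                 grouped_strings.add(' '.join(span))
--                 span = None
--             if tag.startswith(target_label):
--                 span = [tok]
--         if span is not None:
--             grouped_strings.add(' '.join(span))
--     return grouped_strings
-- ===== Notes on version B (the rewrite author's own statement) =====
-- stated objective: simpler
-- what changed: Replaced the nested while loops with index bookkeeping by one flat pass over zip(tokens, tags) that maintains a current span and flushes it on span breaks and at sentence end.
import Mathlib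
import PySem

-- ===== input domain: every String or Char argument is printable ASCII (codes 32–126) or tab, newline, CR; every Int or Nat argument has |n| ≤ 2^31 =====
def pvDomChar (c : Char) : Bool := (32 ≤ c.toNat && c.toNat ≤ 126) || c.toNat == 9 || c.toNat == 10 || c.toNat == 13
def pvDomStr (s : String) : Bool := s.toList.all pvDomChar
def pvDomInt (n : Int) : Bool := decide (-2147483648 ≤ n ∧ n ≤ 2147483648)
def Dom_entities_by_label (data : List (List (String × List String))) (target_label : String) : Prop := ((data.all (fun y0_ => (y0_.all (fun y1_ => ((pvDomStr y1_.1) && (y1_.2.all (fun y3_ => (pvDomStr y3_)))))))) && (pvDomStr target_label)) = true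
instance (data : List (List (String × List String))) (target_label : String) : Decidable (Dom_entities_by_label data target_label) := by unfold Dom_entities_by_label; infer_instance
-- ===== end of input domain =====

-- B replaces A's nested while loops and index bookkeeping with one flat pass over
-- zip(tokens, tags) maintaining a current span (objective: simpler).

-- ===== PORT A =====
-- inner 'while i < len(tokens) and tags[i].startswith("I")' loop
def entAInner (tokens tags : List String) (i : Nat) (span : List String) : List String × Nat :=
  if h : i < tokens.length ∧ PySem.Str.startswith (tags.getD i "") "I" then
    entAInner tokens tags (i + 1) (span ++ [tokens.getD i ""])
  else (span, i)
termination_by tokens.length - i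
decreasing_by omega

-- termination fact the outer loop's recursion cites
theorem entAInner_snd_ge (tokens tags : List String) (i : Nat) (span : List String) :
    i ≤ (entAInner tokens tags i span).2 := by
  fun_induction entAInner with
  | case1 i span h ih => omega
  | case2 i span h => simp

-- outer 'while i < len(tokens)' loop
def entAOuter (tokens tags : List String) (target : String) (i : Nat) (acc : PySem.Set String) : PySem.Set String :=
  if h : i < tokens.length then
    if PySem.Str.startswith (tags.getD i "") target then
      let r := entAInner tokens tags (i + 1) [tokens.getD i ""]
      entAOuter tokens tags target r.2 (PySem.Set.add acc (PySem.Str.join " " r.1))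
    else entAOuter tokens tags target (i + 1) acc
  else acc
termination_by tokens.length - i
decreasing_by
  · have := entAInner_snd_ge tokens tags (i + 1) [tokens.getD i ""]; omega
  · omega

def entities_by_label (data : List (List (String × List String))) (target_label : String) : List String :=
  data.foldl (fun acc sent =>
    let tokens := ((PySem.Dict.mk sent).get? "tokens").getD []
    let tags := ((PySem.Dict.mk sent).get? "ner_tags").getD []
    entAOuter tokens tags target_label 0 acc) PySem.Set.empty

-- ===== PORT B =====
def entBStep (target : String) (st : PySem.Set String × Option (List String)) (p : String × String) :
    PySem.Set String × Option (List String) :=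
  match st.2 with
  | some span =>
      if PySem.Str.startswith p.2 "I" then (st.1, some (span ++ [p.1]))
      else
        let acc := PySem.Set.add st.1 (PySem.Str.join " " span)
        if PySem.Str.startswith p.2 target then (acc, some [p.1]) else (acc, none)
  | none => if PySem.Str.startswith p.2 target then (st.1, some [p.1]) else (st.1, none)

def entBFlush (st : PySem.Set String × Option (List String)) : PySem.Set String :=
  match st.2 with
  | some span => PySem.Set.add st.1 (PySem.Str.join " " span)
  | none => st.1

def entBSentence (target : String) (acc : PySem.Set String) (sent : List (String × List String)) : PySem.Set String :=
  let tokens := ((PySem.Dict.mk sent).get? "tokens").getD []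
  let tags := ((PySem.Dict.mk sent).get? "ner_tags").getD []
  entBFlush ((tokens.zip tags).foldl (entBStep target) (acc, none))

def entities_by_label_alt (data : List (List (String × List String))) (target_label : String) : List String :=
  data.foldl (entBSentence target_label) PySem.Set.empty

-- ===== PRECONDITION & SPEC =====
-- Pre excludes exactly the inputs on which Python A raises: a sentence missing the
-- 'tokens' or 'ner_tags' key (KeyError) or with fewer ner_tags than tokens (IndexError).
def Pre_entities_by_label (data : List (List (String × List String))) (target_label : String) : Prop :=
  ∀ sent ∈ data,
    ((PySem.Dict.mk sent).get? "tokens").isSome = true ∧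
    ((PySem.Dict.mk sent).get? "ner_tags").isSome = true ∧
    (((PySem.Dict.mk sent).get? "tokens").getD []).length ≤ (((PySem.Dict.mk sent).get? "ner_tags").getD []).length
instance (data : List (List (String × List String))) (target_label : String) : Decidable (Pre_entities_by_label data target_label) := by unfold Pre_entities_by_label; infer_instance

def pvWitness_entities_by_label : (List (List (String × List String))) × String :=
  ([[("tokens", ["Al", "Mawsil", "x"]), ("ner_tags", ["B-LOC", "I-LOC", "O"])]], "B-LOC")

def Spec_entities_by_label (data : List (List (String × List String))) (target_label : String) (out : List String) : Prop := out = entities_by_label_alt data target_label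
instance (data : List (List (String × List String))) (target_label : String) (out : List String) : Decidable (Spec_entities_by_label data target_label out) := by unfold Spec_entities_by_label; infer_instance

-- ===== CLAIM (what is proved, stated in full; the proofs are below) =====
def Claim_equal_entities_by_label : Prop := ∀ (data : List (List (String × List String))) (target_label : String), Dom_entities_by_label data target_label → Pre_entities_by_label data target_label → Spec_entities_by_label data target_label (entities_by_label data target_label)

-- ===== LEMMAS AND PROOFS =====

theorem zip_drop_cons (tokens tags : List String) (i : Nat)
    (h : i < tokens.length) (hlen : tokens.length ≤ tags.length) :
    (tokens.zip tags).drop i = (tokens.getD i "", tags.getD i "") :: (tokens.zip tags).drop (i + 1) := by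
  have hz : i < (tokens.zip tags).length := by simp [List.length_zip]; omega
  rw [List.drop_eq_getElem_cons hz]
  congr 1
  have h2 : i < tags.length := by omega
  simp [List.getElem_zip, List.getD_eq_getElem?_getD, h, h2]

theorem zip_drop_nil (tokens tags : List String) (i : Nat)
    (h : tokens.length ≤ i) (hlen : tokens.length ≤ tags.length) :
    (tokens.zip tags).drop i = [] := by
  apply List.drop_eq_nil_of_le
  simp [List.length_zip]; omega

-- core: A's index loops agree with B's flat fold over the zipped suffix
theorem AB_core (tokens tags : List String) (target : String)
    (hlen : tokens.length ≤ tags.length) :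
    ∀ n i, tokens.length - i ≤ n →
      (∀ acc, entAOuter tokens tags target i acc
          = entBFlush (((tokens.zip tags).drop i).foldl (entBStep target) (acc, none)))
      ∧ (∀ acc span,
          entBFlush (((tokens.zip tags).drop i).foldl (entBStep target) (acc, some span))
            = entAOuter tokens tags target (entAInner tokens tags i span).2
                (PySem.Set.add acc (PySem.Str.join " " (entAInner tokens tags i span).1))) := by
  intro n
  induction n with
  | zero =>
    intro i hi
    have hge : tokens.length ≤ i := by omega
    rw [zip_drop_nil tokens tags i hge hlen]
    constructor
    · intro acc
      rw [entAOuter]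
      simp [entBFlush, dif_neg (by omega : ¬ i < tokens.length)]
    · intro acc span
      rw [entAInner]
      have hni : ¬ (i < tokens.length ∧ PySem.Str.startswith (tags.getD i "") "I") := by
        intro ⟨h1, _⟩; omega
      rw [dif_neg hni, entAOuter]
      simp [entBFlush, dif_neg (by omega : ¬ i < tokens.length)]
  | succ n ih =>
    intro i hi
    by_cases h : i < tokens.length
    · rw [zip_drop_cons tokens tags i h hlen]
      simp only [List.foldl_cons]
      have ih1 := fun j (hj : tokens.length - j ≤ n) => (ih j hj).1
      have ih2 := fun j (hj : tokens.length - j ≤ n) => (ih j hj).2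
      constructor
      · intro acc
        rw [entAOuter, dif_pos h]
        simp only [entBStep]
        by_cases ht : PySem.Str.startswith (tags.getD i "") target
        · rw [if_pos ht, if_pos ht]
          exact (ih2 (i + 1) (by omega) acc [tokens.getD i ""]).symm
        · rw [if_neg ht, if_neg ht]
          exact ih1 (i + 1) (by omega) acc
      · intro acc span
        rw [entAInner]
        simp only [entBStep]
        by_cases hI : PySem.Str.startswith (tags.getD i "") "I"
        · rw [dif_pos ⟨h, hI⟩, if_pos hI]
          exact ih2 (i + 1) (by omega) acc (span ++ [tokens.getD i ""])
        · rw [dif_neg (by intro ⟨_, h2⟩; exact hI h2), if_neg hI]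
          rw [entAOuter, dif_pos h]
          by_cases ht : PySem.Str.startswith (tags.getD i "") target
          · rw [if_pos ht, if_pos ht]
            exact ih2 (i + 1) (by omega) (PySem.Set.add acc (PySem.Str.join " " span)) [tokens.getD i ""]
          · rw [if_neg ht, if_neg ht]
            exact (ih1 (i + 1) (by omega) (PySem.Set.add acc (PySem.Str.join " " span))).symm
    · rw [zip_drop_nil tokens tags i (by omega) hlen]
      constructor
      · intro acc
        rw [entAOuter]
        simp [entBFlush, dif_neg h]
      · intro acc span
        rw [entAInner]
        have hni : ¬ (i < tokens.length ∧ PySem.Str.startswith (tags.getD i "") "I") := by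
          intro ⟨h1, _⟩; exact h h1
        rw [dif_neg hni, entAOuter]
        simp [entBFlush, dif_neg h]

theorem sentence_eq (target : String) (sent : List (String × List String))
    (hlen : (((PySem.Dict.mk sent).get? "tokens").getD []).length
          ≤ (((PySem.Dict.mk sent).get? "ner_tags").getD []).length) (acc : PySem.Set String) :
    entAOuter (((PySem.Dict.mk sent).get? "tokens").getD []) (((PySem.Dict.mk sent).get? "ner_tags").getD []) target 0 acc
      = entBSentence target acc sent := by
  unfold entBSentence
  have := (AB_core (((PySem.Dict.mk sent).get? "tokens").getD []) (((PySem.Dict.mk sent).get? "ner_tags").getD []) target hlen _ 0 (le_refl _)).1 acc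
  simpa using this

-- ===== VERDICT (by name: the statement is the Claim_ definition above) =====
theorem folds_eq (target : String) :
    ∀ (l : List (List (String × List String))),
      (∀ sent ∈ l,
        (((PySem.Dict.mk sent).get? "tokens").getD []).length
          ≤ (((PySem.Dict.mk sent).get? "ner_tags").getD []).length) →
      ∀ init : PySem.Set String,
        l.foldl (fun acc sent =>
          let tokens := ((PySem.Dict.mk sent).get? "tokens").getD []
          let tags := ((PySem.Dict.mk sent).get? "ner_tags").getD []
          entAOuter tokens tags target 0 acc) init
        = l.foldl (entBSentence target) init := by
  intro l
  induction l with
  | nil => intro _ init; rfl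
  | cons s t iht =>
    intro hl init
    simp only [List.foldl_cons]
    rw [sentence_eq target s (hl s List.mem_cons_self) init]
    exact iht (fun x hx => hl x (List.mem_cons_of_mem s hx)) _

theorem entities_by_label_spec : Claim_equal_entities_by_label := by
  intro data target _hdom hpre
  unfold Spec_entities_by_label entities_by_label entities_by_label_alt
  exact folds_eq target data (fun sent hs => (hpre sent hs).2.2) PySem.Set.empty
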